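-- pv_equiv track=rewrite | github.com/CoLoDot/algorithms | python/insertion_sort_matrix.py | insertion_sort_matrix
-- ===== SOURCE A (Python) =====
-- def insertion_sort_matrix(matrix):
--     for x in range(0, len(matrix)):
--         cur = matrix[x]
--         for i in range(1, len(cur)):
--             k = cur[i]
--             p = i - 1
--             while p >= 0 and cur[p] > k:
--                 cur[p + 1] = cur[p]
--                 p = p - 1
--             cur[p + 1] = k
--     return matrix
-- ===== SOURCE B (Python) =====
-- def insertion_sort_matrix(matrix):
--     for row in matrix:
--         row.sort()
--     return matrix
-- ===== Notes on version B (the rewrite author's own statement) =====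
-- stated objective: idiomatic
-- what changed: The hand-written per-row insertion sort (index shifting with a while loop) is replaced by the idiomatic in-place `row.sort()` (Timsort) for each row.
import Mathlib
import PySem

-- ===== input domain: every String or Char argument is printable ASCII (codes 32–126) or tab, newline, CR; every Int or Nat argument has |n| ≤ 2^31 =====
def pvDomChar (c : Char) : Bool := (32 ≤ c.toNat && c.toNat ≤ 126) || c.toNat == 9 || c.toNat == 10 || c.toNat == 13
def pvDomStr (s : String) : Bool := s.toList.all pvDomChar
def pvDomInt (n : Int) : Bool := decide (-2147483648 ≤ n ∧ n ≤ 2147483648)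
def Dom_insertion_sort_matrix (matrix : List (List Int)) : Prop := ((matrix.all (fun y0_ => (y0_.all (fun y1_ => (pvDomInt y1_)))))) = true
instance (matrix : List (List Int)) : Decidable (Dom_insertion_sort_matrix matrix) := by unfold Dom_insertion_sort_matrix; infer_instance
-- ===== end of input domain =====

-- B replaces the hand-written per-row insertion sort by the idiomatic `row.sort()`.
-- Both Pythons mutate the row lists in place and return the same matrix object (identical
-- side effects); the equivalence proved here is about the returned value.

-- ===== PORT A =====
-- the `while p >= 0 and cur[p] > k: cur[p+1] = cur[p]; p -= 1` loop, then `cur[p+1] = k`.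
-- `cur[p]` is read only under the short-circuited guard `0 ≤ p`, and all indices touched
-- are in range on every reachable state, so getD/set are exact here.
def pvShiftA (cur : List Int) (k : Int) (p : Int) : List Int :=
  if h : 0 ≤ p ∧ PySem.List.pyGetD cur p 0 > k then
    pvShiftA (cur.set (p + 1).toNat (PySem.List.pyGetD cur p 0)) k (p - 1)
  else cur.set (p + 1).toNat k
termination_by (p + 1).toNat
decreasing_by omega

-- the inner `for i in range(1, len(cur))` loop
def pvSortRowA (cur : List Int) : List Int :=
  (PySem.List.pyRange 1 (cur.length : Int) 1).foldl
    (fun cur i => pvShiftA cur (PySem.List.pyGetD cur i 0) (i - 1)) cur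

-- the outer `for x in range(0, len(matrix))` loop (each row is rewritten in place)
def insertion_sort_matrix (matrix : List (List Int)) : List (List Int) :=
  (PySem.List.pyRange 0 (matrix.length : Int) 1).foldl
    (fun m x => m.set x.toNat (pvSortRowA (PySem.List.pyGetD m x []))) matrix

-- ===== PORT B =====
def insertion_sort_matrix_alt (matrix : List (List Int)) : List (List Int) :=
  matrix.map (fun row => PySem.List.sorted row (fun v => v) false)

-- ===== PRECONDITION & SPEC =====
def Spec_insertion_sort_matrix (matrix : List (List Int)) (out : List (List Int)) : Prop := out = insertion_sort_matrix_alt matrix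
instance (matrix : List (List Int)) (out : List (List Int)) : Decidable (Spec_insertion_sort_matrix matrix out) := by unfold Spec_insertion_sort_matrix; infer_instance

-- ===== CLAIM (what is proved, stated in full; the proofs are below) =====
def Claim_equal_insertion_sort_matrix : Prop := ∀ (matrix : List (List Int)), Dom_insertion_sort_matrix matrix → Spec_insertion_sort_matrix matrix (insertion_sort_matrix matrix)

-- ===== LEMMAS AND PROOFS =====

-- `pvInsRev k r` is what A's shifting loop builds, seen on the REVERSED prefix r
def pvInsRev (k : Int) : List Int → List Int
  | [] => [k]
  | h :: t => if h > k then h :: pvInsRev k t else k :: h :: t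

-- the shift loop, started at the right end of prefix `a` with the slot at index |a| junk,
-- inserts k into a from the right
lemma pvShiftA_eq (a : List Int) (x : Int) (b : List Int) (k : Int) :
    pvShiftA (a ++ x :: b) k ((a.length : Int) - 1) = (pvInsRev k a.reverse).reverse ++ b := by
  induction a using List.reverseRecOn generalizing x b with
  | nil =>
      rw [pvShiftA]
      simp [pvInsRev]
  | append_singleton a' c ih =>
      rw [pvShiftA]
      have hget : PySem.List.pyGetD ((a' ++ [c]) ++ x :: b) (((a' ++ [c]).length : Int) - 1) 0 = c := by
        have : ((a' ++ [c]).length : Int) - 1 = (a'.length : Int) := by simp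
        rw [this]
        simp [PySem.List.pyGetD_natCast]
      by_cases hc : c > k
      · have hcond : 0 ≤ ((a' ++ [c]).length : Int) - 1 ∧
            PySem.List.pyGetD ((a' ++ [c]) ++ x :: b) (((a' ++ [c]).length : Int) - 1) 0 > k := by
          refine ⟨by simp only [List.length_append, List.length_cons, List.length_nil]; push_cast; omega, by rw [hget]; exact hc⟩
        rw [dif_pos hcond, hget]
        have hset : (((a' ++ [c]) ++ x :: b).set ((((a' ++ [c]).length : Int) - 1) + 1).toNat c)
            = a' ++ c :: c :: b := by
          have h1 : ((((a' ++ [c]).length : Int) - 1) + 1).toNat = a'.length + 1 := by simp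
          rw [h1]
          simp
        have hp : (((a' ++ [c]).length : Int) - 1) - 1 = (a'.length : Int) - 1 := by simp
        rw [hset, hp]
        have := ih (x := c) (b := c :: b)
        rw [show a' ++ c :: c :: b = a' ++ c :: (c :: b) from rfl] at this
        rw [this]
        simp [pvInsRev, hc]
      · have hcond : ¬ (0 ≤ ((a' ++ [c]).length : Int) - 1 ∧
            PySem.List.pyGetD ((a' ++ [c]) ++ x :: b) (((a' ++ [c]).length : Int) - 1) 0 > k) := by
          rw [hget]; intro h; exact hc h.2
        rw [dif_neg hcond]
        have h1 : ((((a' ++ [c]).length : Int) - 1) + 1).toNat = a'.length + 1 := by simp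
        rw [h1]
        simp [pvInsRev, hc]

lemma mem_pvInsRev {y k : Int} {r : List Int} (h : y ∈ pvInsRev k r) : y = k ∨ y ∈ r := by
  induction r with
  | nil => simpa [pvInsRev] using h
  | cons h' t ih =>
      by_cases hk : h' > k
      · simp only [pvInsRev, if_pos hk, List.mem_cons] at h
        rcases h with h | h
        · exact Or.inr (by simp [h])
        · rcases ih h with h | h
          · exact Or.inl h
          · exact Or.inr (by simp [h])
      · simp only [pvInsRev, if_neg hk, List.mem_cons] at h
        rcases h with h | h | h
        · exact Or.inl h
        · exact Or.inr (by simp [h])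
        · exact Or.inr (by simp [h])

lemma pvInsRev_perm (k : Int) (r : List Int) : (pvInsRev k r).Perm (k :: r) := by
  induction r with
  | nil => simp [pvInsRev]
  | cons h t ih =>
      by_cases hk : h > k
      · simp only [pvInsRev, if_pos hk]
        exact (ih.cons h).trans (List.Perm.swap _ _ _)
      · simp [pvInsRev, hk]

lemma pvInsRev_pairwise {k : Int} {r : List Int} (hr : r.Pairwise (fun u v => v ≤ u)) :
    (pvInsRev k r).Pairwise (fun u v => v ≤ u) := by
  induction r with
  | nil => simp [pvInsRev]
  | cons h t ih =>
      rw [List.pairwise_cons] at hr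
      by_cases hk : h > k
      · simp only [pvInsRev, if_pos hk]
        rw [List.pairwise_cons]
        refine ⟨fun y hy => ?_, ih hr.2⟩
        rcases mem_pvInsRev hy with rfl | hy
        · omega
        · exact hr.1 y hy
      · simp only [pvInsRev, if_neg hk]
        rw [List.pairwise_cons]
        refine ⟨fun y hy => ?_, List.pairwise_cons.2 hr⟩
        rcases List.mem_cons.1 hy with rfl | hy
        · omega
        · have := hr.1 y hy; omega

-- insertion into prefix s (what one pass of A's inner loop does to the sorted prefix)
def pvIns (s : List Int) (k : Int) : List Int := (pvInsRev k s.reverse).reverse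

lemma pvIns_perm (s : List Int) (k : Int) : (pvIns s k).Perm (k :: s) := by
  exact ((List.reverse_perm _).trans (pvInsRev_perm k s.reverse)).trans ((s.reverse_perm).cons k)

lemma pvIns_length (s : List Int) (k : Int) : (pvIns s k).length = s.length + 1 := by
  have := (pvIns_perm s k).length_eq; simpa using this

lemma pvIns_pairwise {s : List Int} (hs : s.Pairwise (· ≤ ·)) (k : Int) :
    (pvIns s k).Pairwise (· ≤ ·) := by
  have hrev : s.reverse.Pairwise (fun u v => v ≤ u) := by
    rw [List.pairwise_reverse]; exact hs
  have := pvInsRev_pairwise (k := k) hrev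
  rw [pvIns, List.pairwise_reverse]
  exact this

-- the whole inner loop as structural recursion over the unsorted tail
def pvSortAux : List Int → List Int → List Int
  | s, [] => s
  | s, k :: t => pvSortAux (pvIns s k) t

lemma pvSortRowA_loop (t : List Int) : ∀ (s : List Int),
    (PySem.List.pyRange (s.length : Int) ((s.length : Int) + (t.length : Int)) 1).foldl
      (fun cur i => pvShiftA cur (PySem.List.pyGetD cur i 0) (i - 1)) (s ++ t)
    = pvSortAux s t := by
  induction t with
  | nil =>
      intro s
      rw [PySem.List.pyRange_one_eq_nil (by simp)]
      simp [pvSortAux]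
  | cons k t' ih =>
      intro s
      rw [PySem.List.pyRange_one_cons (by simp only [List.length_cons]; push_cast; omega)]
      rw [List.foldl_cons]
      have hget : PySem.List.pyGetD (s ++ k :: t') (s.length : Int) 0 = k := by
        simp [PySem.List.pyGetD_natCast]
      rw [hget]
      have hshift : pvShiftA (s ++ k :: t') k ((s.length : Int) - 1)
          = (pvInsRev k s.reverse).reverse ++ t' := pvShiftA_eq s k t' k
      rw [hshift]
      have hlen : ((pvIns s k).length : Int) = (s.length : Int) + 1 := by
        rw [pvIns_length]; push_cast; ring
      have hrange : PySem.List.pyRange ((s.length : Int) + 1) ((s.length : Int) + ((k :: t').length : Int)) 1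
          = PySem.List.pyRange ((pvIns s k).length : Int) (((pvIns s k).length : Int) + (t'.length : Int)) 1 := by
        rw [hlen]; congr 1; simp only [List.length_cons]; push_cast; ring
      rw [hrange]
      exact ih (pvIns s k)

lemma pvSortAux_pairwise_perm : ∀ (t s : List Int), s.Pairwise (· ≤ ·) →
    (pvSortAux s t).Pairwise (· ≤ ·) ∧ (pvSortAux s t).Perm (s ++ t) := by
  intro t
  induction t with
  | nil => intro s hs; exact ⟨hs, by simp [pvSortAux]⟩
  | cons k t' ih =>
      intro s hs
      obtain ⟨h1, h2⟩ := ih (pvIns s k) (pvIns_pairwise hs k)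
      refine ⟨h1, ?_⟩
      refine h2.trans (((pvIns_perm s k).append_right t').trans ?_)
      simpa using (List.perm_middle (a := k) (l₁ := s) (l₂ := t')).symm

lemma pvSortRowA_eq_sorted (cur : List Int) :
    pvSortRowA cur = PySem.List.sorted cur (fun v => v) false := by
  cases cur with
  | nil =>
      rw [pvSortRowA, PySem.List.pyRange_one_eq_nil (by simp)]
      simp [PySem.List.sorted_eq_nil_iff]
  | cons c rest =>
      have h0 : pvSortRowA (c :: rest) = pvSortAux [c] rest := by
        rw [pvSortRowA]
        have := pvSortRowA_loop rest [c]
        have hr : (PySem.List.pyRange (([c] : List Int).length : Int)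
            ((([c] : List Int).length : Int) + (rest.length : Int)) 1)
            = PySem.List.pyRange 1 (((c :: rest : List Int).length : Int)) 1 := by
          congr 1
          all_goals simp
          omega
        rw [hr] at this
        simpa using this
      obtain ⟨h1, h2⟩ := pvSortAux_pairwise_perm rest [c] (by simp)
      rw [h0]
      exact (PySem.List.sorted_id_eq_of_perm_of_pairwise (c :: rest) (pvSortAux [c] rest)
        (by simpa using h2) h1).symm

lemma outer_loop_eq : ∀ (rest done : List (List Int)),
    (PySem.List.pyRange (done.length : Int) ((done.length : Int) + (rest.length : Int)) 1).foldl
      (fun m x => m.set x.toNat (pvSortRowA (PySem.List.pyGetD m x []))) (done ++ rest)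
    = done ++ rest.map pvSortRowA := by
  intro rest
  induction rest with
  | nil =>
      intro done
      rw [PySem.List.pyRange_one_eq_nil (by simp)]
      simp
  | cons r rest' ih =>
      intro done
      rw [PySem.List.pyRange_one_cons (by simp only [List.length_cons]; push_cast; omega)]
      rw [List.foldl_cons]
      have hget : PySem.List.pyGetD (done ++ r :: rest') (done.length : Int) [] = r := by
        simp [PySem.List.pyGetD_natCast]
      have htoNat : ((done.length : Int)).toNat = done.length := by simp
      rw [hget, htoNat]
      have hset : (done ++ r :: rest').set done.length (pvSortRowA r)
          = (done ++ [pvSortRowA r]) ++ rest' := by simp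
      rw [hset]
      have hrange : PySem.List.pyRange ((done.length : Int) + 1)
          ((done.length : Int) + ((r :: rest').length : Int)) 1
          = PySem.List.pyRange (((done ++ [pvSortRowA r]).length : Int))
            (((done ++ [pvSortRowA r]).length : Int) + (rest'.length : Int)) 1 := by
        congr 1 <;> (simp; try omega)
      rw [hrange, ih (done ++ [pvSortRowA r])]
      simp

-- ===== VERDICT (by name: the statement is the Claim_ definition above) =====
theorem insertion_sort_matrix_spec : Claim_equal_insertion_sort_matrix := by
  intro matrix _
  show insertion_sort_matrix matrix = insertion_sort_matrix_alt matrix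
  rw [insertion_sort_matrix, insertion_sort_matrix_alt]
  have := outer_loop_eq matrix []
  simp only [List.nil_append, List.length_nil, Nat.cast_zero, zero_add] at this
  rw [this]
  exact List.map_congr_left (fun row _ => pvSortRowA_eq_sorted row)
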